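-- pv_equiv track=rewrite | github.com/JoelLinn/rage-hash | gpu/rage_hash.py | _name_next
-- ===== SOURCE A (Python) =====
-- def _name_next(n, len):
--     for i in range(len):
--         if n[i] >= ord('z'):
--             #overflow
--             n[i] = ord('_')
--             continue
--         elif n[i] == ord('_'):
--             # skip '`'
--             n[i] = ord('a')
--         else:
--             n[i] = n[i] + 1
--         return True
--     return False
-- ===== SOURCE B (Python) =====
-- def _name_next(n, len):
--     # Pure-functional recursive carry propagation: build the updated name
--     # immutably, then splice it back in one assignment.
--     def bump(vals):
--         if not vals:
--             return [], False
--         v = vals[0]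
--         if v >= ord('z'):
--             tail, ok = bump(vals[1:])
--             return [ord('_')] + tail, ok
--         return [ord('a') if v == ord('_') else v + 1] + vals[1:], True
--     new, ok = bump(n[:max(len, 0)])
--     n[:max(len, 0)] = new
--     return ok
-- ===== Notes on version B (the rewrite author's own statement) =====
-- stated objective: alternative
-- what changed: A is an imperative indexed loop mutating the array in place with continue/early-return; B is a pure recursive carry-propagation function that constructs the whole updated prefix immutably (cons cells, back from the carry point) and splices it in with one assignment.
import Mathlib
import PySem

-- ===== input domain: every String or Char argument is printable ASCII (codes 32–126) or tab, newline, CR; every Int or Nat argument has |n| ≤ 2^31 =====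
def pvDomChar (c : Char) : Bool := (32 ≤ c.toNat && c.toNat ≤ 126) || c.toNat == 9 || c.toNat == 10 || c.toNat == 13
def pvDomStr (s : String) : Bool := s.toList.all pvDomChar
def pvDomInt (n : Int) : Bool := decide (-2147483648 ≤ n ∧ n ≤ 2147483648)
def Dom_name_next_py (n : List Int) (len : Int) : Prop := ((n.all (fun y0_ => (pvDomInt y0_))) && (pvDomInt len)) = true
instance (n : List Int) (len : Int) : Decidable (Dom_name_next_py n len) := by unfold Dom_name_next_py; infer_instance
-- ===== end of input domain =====

-- B replaces A's imperative in-place indexed loop by a pure recursive carry propagation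
-- that rebuilds the prefix immutably and splices it back once; the theorems are about
-- the RETURN value only (both Pythons perform the same in-place mutation on Pre_).

-- ===== PORT A =====
-- A's for-loop 'for i in range(len)': indexes n[i]; '>= z' continues, the other two branches return True.
def nameNextLoopA (n : List Int) (len i : Int) : Bool :=
  if _h : i < len then
    match PySem.List.pyGet? n i with
    | none => false  -- IndexError in Python; excluded by Pre_name_next_py
    | some v =>
      if v ≥ 122 then nameNextLoopA n len (i + 1)  -- overflow: n[i] = '_'; continue
      else if v = 95 then true                     -- n[i] = 'a'; return True
      else true                                    -- n[i] = n[i] + 1; return True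
  else false
termination_by (len - i).toNat
decreasing_by omega

def name_next_py (n : List Int) (len : Int) : Bool :=
  nameNextLoopA n len 0

-- ===== PORT B =====
-- B's recursive bump(vals): returns (new prefix, success); only .2 reaches the return value.
def nameNextBumpB : List Int → List Int × Bool
  | [] => ([], false)
  | v :: rest =>
    if v ≥ 122 then
      let (tail, ok) := nameNextBumpB rest
      (95 :: tail, ok)
    else ((if v = 95 then 97 else v + 1) :: rest, true)

def name_next_py_alt (n : List Int) (len : Int) : Bool :=
  (nameNextBumpB (PySem.List.slice n none (some (max len 0)))).2

-- ===== PRECONDITION & SPEC =====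
-- Pre_ excludes exactly the inputs on which A raises IndexError: len runs past the list while
-- every element overflows (≥ ord('z')).
def Pre_name_next_py (n : List Int) (len : Int) : Prop :=
  len ≤ (n.length : Int) ∨ ∃ x ∈ n, x < 122
instance (n : List Int) (len : Int) : Decidable (Pre_name_next_py n len) := by
  unfold Pre_name_next_py; infer_instance

def pvWitness_name_next_py : List Int × Int := ([97, 122], 2)

def Spec_name_next_py (n : List Int) (len : Int) (out : Bool) : Prop := out = name_next_py_alt n len
instance (n : List Int) (len : Int) (out : Bool) : Decidable (Spec_name_next_py n len out) := by unfold Spec_name_next_py; infer_instance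

-- ===== CLAIM (what is proved, stated in full; the proofs are below) =====
def Claim_equal_name_next_py : Prop := ∀ (n : List Int) (len : Int), Dom_name_next_py n len → Pre_name_next_py n len → Spec_name_next_py n len (name_next_py n len)

-- ===== LEMMAS AND PROOFS =====

-- A's loop from index j with d iterations left equals a bounded any-scan of n.drop j.
theorem loopA_scan (n : List Int) (len : Int) (d : Nat) : ∀ (j : Nat),
    (len - (j : Int)).toNat = d →
    nameNextLoopA n len (j : Int) =
      ((n.drop j).take d).any (fun v => decide (v < 122)) := by
  induction d with
  | zero =>
    intro j hd
    rw [nameNextLoopA]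
    simp [show ¬ ((j : Int) < len) by omega]
  | succ d ih =>
    intro j hd
    rw [nameNextLoopA]
    simp only [show ((j : Int) < len) = True by simp; omega, dite_true,
               PySem.List.pyGet?_natCast]
    rcases h : n[j]? with _ | v
    · have hlen : n.length ≤ j := by
        by_contra hc
        push Not at hc
        rw [List.getElem?_eq_getElem hc] at h
        cases h
      simp [List.drop_eq_nil_of_le hlen]
    · have hj : j < n.length := by
        by_contra hc
        rw [List.getElem?_eq_none (show n.length ≤ j by omega)] at h; cases h
      have hdrop : n.drop j = v :: n.drop (j + 1) := by
        rw [List.drop_eq_getElem_cons hj]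
        simp [List.getElem?_eq_getElem hj] at h
        simp [h]
      have harg : (j : Int) + 1 = ((j + 1 : Nat) : Int) := by push_cast; ring
      rw [harg, ih (j + 1) (by omega), hdrop]
      by_cases hv : v ≥ 122
      · simp [hv, show ¬ v < 122 by omega]
      · by_cases h95 : v = 95 <;> simp [hv, h95, show v < 122 by omega]

-- B's recursive bump succeeds iff some element of its argument is below 'z'.
theorem bumpB_snd (l : List Int) :
    (nameNextBumpB l).2 = l.any (fun v => decide (v < 122)) := by
  induction l with
  | nil => simp [nameNextBumpB]
  | cons v rest ih =>
    by_cases hv : v ≥ 122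
    · simp [nameNextBumpB, hv, show ¬ v < 122 by omega, ih]
    · simp [nameNextBumpB, hv, show v < 122 by omega]

theorem ports_agree (n : List Int) (len : Int) :
    name_next_py n len = name_next_py_alt n len := by
  unfold name_next_py name_next_py_alt
  rw [PySem.List.slice_to _ (le_max_right len 0), bumpB_snd]
  conv_lhs => rw [show (0 : Int) = ((0 : Nat) : Int) from rfl]
  rw [loopA_scan n len len.toNat 0 (by omega)]
  have : (max len 0).toNat = len.toNat := by omega
  simp [this]

-- ===== VERDICT (by name: the statement is the Claim_ definition above) =====
theorem name_next_py_spec : Claim_equal_name_next_py := by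
  intro n len _ _
  unfold Spec_name_next_py
  exact ports_agree n len
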